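-- pv_equiv track=rewrite | github.com/nayanika2304/DataStructuresPractice | Practise_bit_manipulation/pairwise_swap.py | create_odd_mask
-- ===== SOURCE A (Python) =====
-- def create_odd_mask(num):
--     bin_representation = bin(num)[2:]
--     bit_length = len(bin_representation)
--     bit_sign = '0'
--     mask = []
--
--     for i in range(bit_length):
--         mask.insert(0, bit_sign)
--         bit_sign = '1' if bit_sign == '0' else '0'
--
--     return int(''.join(mask), 2)
-- ===== SOURCE B (Python) =====
-- def create_odd_mask(num):
--     # bit length measured exactly as A does, via the sliced bin() string
--     # (this matches A's count for zero and for negative numbers too)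
--     n = len(bin(num)) - 2
--     return sum(1 << i for i in range(1, n, 2))
-- ===== Notes on version B (the rewrite author's own statement) =====
-- stated objective: simpler
-- what changed: Instead of building a character list front-to-back with repeated insert-at-front of a toggled sign and then parsing the joined string as base two, B takes the same bit length from the sliced bin() string and directly sums the powers of two at the odd bit positions below it, with no list construction or string parsing.
import Mathlib
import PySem

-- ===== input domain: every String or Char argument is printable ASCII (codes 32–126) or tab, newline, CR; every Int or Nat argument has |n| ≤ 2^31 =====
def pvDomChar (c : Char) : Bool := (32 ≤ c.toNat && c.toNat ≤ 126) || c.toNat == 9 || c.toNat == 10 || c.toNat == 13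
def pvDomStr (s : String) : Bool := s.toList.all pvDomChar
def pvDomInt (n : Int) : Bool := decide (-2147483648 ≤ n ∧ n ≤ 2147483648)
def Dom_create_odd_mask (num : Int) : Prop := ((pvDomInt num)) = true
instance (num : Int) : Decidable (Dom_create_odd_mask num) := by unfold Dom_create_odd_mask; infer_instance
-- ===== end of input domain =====

-- B replaces A's build-a-char-list-then-parse loop by summing 1 << i over the odd
-- bit positions below the same bit length (objective: simpler; return value only).

-- ===== PORT A =====
-- bin(m) for m > 0, most significant digit first (hand port of Python's bin, exact for Nat)
def pvBinDigits (m : Nat) : List Char :=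
  if hz : m = 0 then []
  else pvBinDigits (m / 2) ++ [if m % 2 = 1 then '1' else '0']
decreasing_by exact Nat.div_lt_self (Nat.pos_of_ne_zero hz) (by omega)

-- bin(num)[2:] as a list of chars: '0' for 0; for negative num the slice keeps the 'b'
def pvBinRepr (num : Int) : List Char :=
  if num = 0 then ['0']
  else if num < 0 then 'b' :: pvBinDigits num.natAbs
  else pvBinDigits num.natAbs

def create_odd_mask (num : Int) : Int :=
  let bin_representation := pvBinRepr num
  let bit_length : Int := bin_representation.length
  -- for i in range(bit_length): mask.insert(0, bit_sign); toggle bit_sign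
  let st := (PySem.List.pyRange 0 bit_length 1).foldl
    (fun (s : List Char × Char) _ => (s.2 :: s.1, if s.2 = '0' then '1' else '0'))
    ([], '0')
  -- int(''.join(mask), 2): hand port, exact since mask holds only '0'/'1'
  st.1.foldl (fun (acc : Int) c => acc * 2 + (if c = '1' then 1 else 0)) 0

-- ===== PORT B =====
def create_odd_mask_alt (num : Int) : Int :=
  -- n = len(bin(num)) - 2  (same bin(num)[2:] helper, whose length is exactly that)
  let n : Int := (pvBinRepr num).length
  -- sum(1 << i for i in range(1, n, 2))
  (PySem.List.pyRange 1 n 2).foldl (fun (acc : Int) i => acc + 2 ^ i.toNat) 0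

-- ===== PRECONDITION & SPEC =====
def Spec_create_odd_mask (num : Int) (out : Int) : Prop := out = create_odd_mask_alt num
instance (num : Int) (out : Int) : Decidable (Spec_create_odd_mask num out) := by unfold Spec_create_odd_mask; infer_instance

-- ===== CLAIM (what is proved, stated in full; the proofs are below) =====
def Claim_equal_create_odd_mask : Prop := ∀ (num : Int), Dom_create_odd_mask num → Spec_create_odd_mask num (create_odd_mask num)

-- ===== LEMMAS AND PROOFS =====

-- A's value as a function of the bit length alone
def pvFA (n : Nat) : Int :=
  ((PySem.List.pyRange 0 (n : Int) 1).foldl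
    (fun (s : List Char × Char) _ => (s.2 :: s.1, if s.2 = '0' then '1' else '0'))
    ([], '0')).1.foldl (fun (acc : Int) c => acc * 2 + (if c = '1' then 1 else 0)) 0

-- B's value as a function of the bit length alone
def pvFB (n : Nat) : Int :=
  (PySem.List.pyRange 1 (n : Int) 2).foldl (fun (acc : Int) i => acc + 2 ^ i.toNat) 0

theorem pvFA_eq_pvFB : ∀ n : Nat, n < 34 → pvFA n = pvFB n := by decide

theorem pvBinDigits_len_le : ∀ (k m : Nat), m < 2 ^ k → (pvBinDigits m).length ≤ k := by
  intro k
  induction k with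
  | zero => intro m hm; interval_cases m; simp [pvBinDigits]
  | succ k ih =>
    intro m hm
    rw [pvBinDigits]
    split
    · simp
    · have h2 : m / 2 < 2 ^ k := by
        have : (2:Nat) ^ (k+1) = 2 * 2 ^ k := by ring
        omega
      have := ih (m / 2) h2
      simp [List.length_append]
      omega

theorem pvBinRepr_len_lt (num : Int) (h : Dom_create_odd_mask num) :
    (pvBinRepr num).length < 34 := by
  have hab : num.natAbs < 2 ^ 32 := by
    simp only [Dom_create_odd_mask, pvDomInt, decide_eq_true_eq] at h
    omega
  have hd := pvBinDigits_len_le 32 num.natAbs hab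
  unfold pvBinRepr
  split
  · simp
  · split <;> simp <;> omega

-- ===== VERDICT (by name: the statement is the Claim_ definition above) =====
theorem create_odd_mask_spec : Claim_equal_create_odd_mask := by
  intro num hdom
  show create_odd_mask num = create_odd_mask_alt num
  have hA : create_odd_mask num = pvFA (pvBinRepr num).length := rfl
  have hB : create_odd_mask_alt num = pvFB (pvBinRepr num).length := rfl
  rw [hA, hB]
  exact pvFA_eq_pvFB _ (pvBinRepr_len_lt num hdom)
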